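-- pv_equiv track=rewrite | github.com/Yuplx-HU/feature-engineer | feature_engineer.py | convert_to_number_columns
-- ===== SOURCE A (Python) =====
-- def convert_to_number_columns(columns) -> list[int]:
--     if all(isinstance(col, int) for col in columns):
--         return columns
--     elif all(isinstance(col, str) for col in columns):
--         number_columns = []
--         for column in columns:
--             column = column.upper()
--
--             if not column.isalpha():
--                 raise ValueError("Column letter must contain only alphabetic characters.")
--
--             result = 0
--
--             for i, char in enumerate(reversed(column)):
--                 char_value = ord(char) - ord('A') + 1
--                 result += char_value * (26 ** i)
--
--             number_columns.append(result - 1)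
--
--         return number_columns
--     else:
--         raise ValueError("Columns must be all integers or all strings.")
-- ===== SOURCE B (Python) =====
-- def _col_index(s):
--     """1-based Excel index of an uppercase column label, by recursion on the
--     last letter: index(s) = index(s[:-1]) * 26 + value(s[-1])."""
--     if s == "":
--         raise ValueError("Column letter must contain only alphabetic characters.")
--     v = ord(s[-1]) - ord('A') + 1
--     if not 1 <= v <= 26:
--         raise ValueError("Column letter must contain only alphabetic characters.")
--     if len(s) == 1:
--         return v
--     return _col_index(s[:-1]) * 26 + v
--
--
-- def convert_to_number_columns(columns) -> list[int]:
--     if all(isinstance(col, int) for col in columns):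
--         return columns
--     if all(isinstance(col, str) for col in columns):
--         return [_col_index(col.upper()) - 1 for col in columns]
--     raise ValueError("Columns must be all integers or all strings.")
-- ===== Notes on version B (the rewrite author's own statement) =====
-- stated objective: alternative
-- what changed: The per-column reversed-enumerate loop summing char_value * 26**i is replaced by a recursive helper on the string's last letter (index(s) = index(s[:-1])*26 + value(s[-1])), with the column list built by a comprehension instead of an accumulator loop; no reversal and no power is computed.
import Mathlib
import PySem

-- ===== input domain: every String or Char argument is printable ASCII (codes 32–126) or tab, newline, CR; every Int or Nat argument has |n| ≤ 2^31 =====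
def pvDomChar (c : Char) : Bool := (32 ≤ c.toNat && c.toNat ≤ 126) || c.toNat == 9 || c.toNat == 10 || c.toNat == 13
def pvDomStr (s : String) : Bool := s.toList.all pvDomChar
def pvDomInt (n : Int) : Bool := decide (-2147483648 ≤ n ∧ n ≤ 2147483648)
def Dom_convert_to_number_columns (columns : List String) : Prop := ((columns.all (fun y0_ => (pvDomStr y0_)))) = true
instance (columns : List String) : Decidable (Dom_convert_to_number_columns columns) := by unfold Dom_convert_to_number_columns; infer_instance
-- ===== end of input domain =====

-- B replaces A's reversed-enumerate 26**i power sum by a recursive helper on the last letter and a comprehension (alternative decomposition; same cost).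


-- ===== PORT A =====
-- 'all(isinstance(col, int))': under the List String typing this holds exactly for the empty list,
-- where A returns 'columns' itself, i.e. []. The str-branch loop appends per column.
def convert_to_number_columns (columns : List String) : List Int :=
  if columns.all (fun _ => false) then []
  else
    columns.foldl
      (fun number_columns column =>
        let cu := PySem.Chars.upper column.toList
        let result : Int :=
          (PySem.List.enumerate cu.reverse 0).foldl
            (fun r p => r + (((p.2.toNat : Int) - 65 + 1) * 26 ^ p.1.toNat)) 0
        number_columns ++ [result - 1])
      []

-- ===== PORT B =====
-- Port of Source B's _col_index: recursion on the last character (s[:-1] / s[-1]).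
-- Where the Python helper raises ValueError (empty string, non-A..Z character — inputs
-- excluded by Pre_ below) the port returns the running value with no extra branch.
def colIndex (cs : List Char) : Int :=
  if h : cs.length = 0 then 0
  else
    let v : Int := ((cs.getLastD 'A').toNat : Int) - 65 + 1
    if cs.length = 1 then v else colIndex cs.dropLast * 26 + v
termination_by cs.length
decreasing_by
  simp only [List.length_dropLast]
  omega

def convert_to_number_columns_alt (columns : List String) : List Int :=
  if columns.all (fun _ => false) then []
  else columns.map (fun col => colIndex (PySem.Chars.upper col.toList) - 1)

-- ===== PRECONDITION & SPEC =====
-- Pre_ excludes exactly the inputs where A raises ValueError: a column whose uppercased text is not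
-- purely alphabetic (including the empty string).
def Pre_convert_to_number_columns (columns : List String) : Prop :=
  ∀ s ∈ columns, PySem.Chars.strIsalpha (PySem.Chars.upper s.toList) = true
instance (columns : List String) : Decidable (Pre_convert_to_number_columns columns) := by unfold Pre_convert_to_number_columns; infer_instance
def pvWitness_convert_to_number_columns : List String := (["aB", "ZZ"])
def Spec_convert_to_number_columns (columns : List String) (out : List Int) : Prop := out = convert_to_number_columns_alt columns
instance (columns : List String) (out : List Int) : Decidable (Spec_convert_to_number_columns columns out) := by unfold Spec_convert_to_number_columns; infer_instance

-- ===== CLAIM (what is proved, stated in full; the proofs are below) =====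
def Claim_equal_convert_to_number_columns : Prop := ∀ (columns : List String), Dom_convert_to_number_columns columns → Pre_convert_to_number_columns columns → Spec_convert_to_number_columns columns (convert_to_number_columns columns)

-- ===== LEMMAS AND PROOFS =====

-- Horner with seed a equals a * 26^len plus Horner with seed 0.
theorem horner_seed (cs : List Char) (a : Int) :
    cs.foldl (fun r c => r * 26 + ((c.toNat : Int) - 65 + 1)) a
      = a * 26 ^ cs.length + cs.foldl (fun r c => r * 26 + ((c.toNat : Int) - 65 + 1)) 0 := by
  induction cs generalizing a with
  | nil => simp
  | cons c cs ih =>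
    simp only [List.foldl_cons, List.length_cons]
    rw [ih (a * 26 + _), ih (0 * 26 + _)]
    ring

-- A's reversed-enumerate power sum equals the forward Horner value, for every char list.
theorem revsum_eq_horner (cs : List Char) :
    (PySem.List.enumerate cs.reverse 0).foldl
        (fun r p => r + (((p.2.toNat : Int) - 65 + 1) * 26 ^ p.1.toNat)) 0
      = cs.foldl (fun r c => r * 26 + ((c.toNat : Int) - 65 + 1)) 0 := by
  induction cs with
  | nil => simp
  | cons c cs ih =>
    have hrev : (c :: cs).reverse = cs.reverse ++ [c] := by simp
    rw [hrev, PySem.List.enumerate_append]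
    rw [List.foldl_append]
    simp only [List.length_reverse, PySem.List.enumerate_cons, PySem.List.enumerate_nil,
      List.foldl_cons, List.foldl_nil]
    rw [ih, horner_seed cs (0 * 26 + ((c.toNat : Int) - 65 + 1))]
    have : ((0 : Int) + cs.length).toNat = cs.length := by simp
    rw [this]
    ring

-- B's last-letter recursion also computes the Horner value, for every char list.
theorem colIndex_eq_horner (cs : List Char) :
    colIndex cs = cs.foldl (fun r c => r * 26 + ((c.toNat : Int) - 65 + 1)) 0 := by
  induction cs using List.reverseRecOn with
  | nil => rw [colIndex]; simp
  | append_singleton cs c ih =>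
    rw [colIndex]
    simp only [List.getLastD_concat, List.dropLast_concat, List.length_append,
      List.length_singleton, List.foldl_append, List.foldl_cons, List.foldl_nil]
    rw [dif_neg (by omega : ¬ cs.length + 1 = 0)]
    by_cases hnil : cs = []
    · subst hnil; simp
    · have hlen : cs.length + 1 ≠ 1 := by
        have := List.length_pos_iff.mpr hnil; omega
      rw [if_neg hlen, ih]

-- ===== VERDICT (by name: the statement is the Claim_ definition above) =====
theorem convert_to_number_columns_spec : Claim_equal_convert_to_number_columns := by
  intro columns _ _
  unfold Spec_convert_to_number_columns convert_to_number_columns convert_to_number_columns_alt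
  split
  · rfl
  · rw [PySem.List.foldl_append_singleton_eq_map]
    refine List.map_congr_left (fun column _ => ?_)
    rw [colIndex_eq_horner, revsum_eq_horner]
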